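-- pv_equiv track=rewrite | github.com/Shike-Cheng/CRUcialG | graph2repair.py | calculate_FR
-- ===== SOURCE A (Python) =====
-- def calculate_FR(node, start, edges):
--     fr_count = 0
--     fr_list = []               # node作为客体，被FR的关系下标
--     for i in range(start, len(edges)):
--         if node == edges[i][1] and edges[i][2] == 6:
--             fr_count += 1
--             fr_list.append(i)
--
--     if fr_count > 0:
--         degree_list = []       # 每次被FR之后，node在该FR之后的出度
--         for j in fr_list:
--             degree_count = 0
--             for x in range(j, len(edges)):           # 计算在j之后，node的出度
--                 if node == edges[x][0]:
--                     degree_count += 1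
--             degree_list.append(degree_count)
--
--         if max(degree_list) == 0:
--             del fr_list[0]
--             return True, fr_list                     # 返回存在多次FR的情况，当node没有出度时，保留最开始的FR
--         else:
--             max_index = degree_list.index(max(degree_list))
--             del fr_list[max_index]
--             return True, fr_list                     # 返回存在多次FR的情况，除去需要保留的那次FR
--     else:
--         return False, None
-- ===== SOURCE B (Python) =====
-- def calculate_FR(node, start, edges):
--     # One pass: collect the FR indices.  The out-degree of `node` counted from
--     # position j onward can only shrink as j grows, so the first FR in fr_list
--     # always attains the maximal degree, and A's "keep the max-degree FR"
--     # (and its all-zero branch) both amount to dropping the first element.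
--     fr_list = [i for i in range(start, len(edges))
--                if node == edges[i][1] and edges[i][2] == 6]
--     if fr_list:
--         return True, fr_list[1:]
--     return False, None
-- ===== Notes on version B (the rewrite author's own statement) =====
-- stated objective: simpler
-- what changed: B drops A's per-FR rescan of the edge tail and its max/index selection entirely: since the out-degree counted from position j onward is nonincreasing in j, A always deletes the first collected FR index, so B just collects the FR indices in one pass and returns all but the first.
import Mathlib
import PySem

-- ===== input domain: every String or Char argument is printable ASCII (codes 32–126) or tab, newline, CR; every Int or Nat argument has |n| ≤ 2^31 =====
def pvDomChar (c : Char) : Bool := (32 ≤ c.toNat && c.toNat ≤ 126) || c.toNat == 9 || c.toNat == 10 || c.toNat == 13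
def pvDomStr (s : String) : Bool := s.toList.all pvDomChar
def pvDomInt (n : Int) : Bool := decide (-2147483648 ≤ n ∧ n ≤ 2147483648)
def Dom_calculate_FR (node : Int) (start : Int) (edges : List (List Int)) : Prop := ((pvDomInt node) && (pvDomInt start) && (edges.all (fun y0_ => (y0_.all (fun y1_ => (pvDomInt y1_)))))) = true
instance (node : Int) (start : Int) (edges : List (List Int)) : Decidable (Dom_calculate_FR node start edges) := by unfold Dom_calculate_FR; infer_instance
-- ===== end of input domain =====

-- B replaces A's per-FR rescans of the edge tail by the observation that the
-- out-degree counted from j onward is nonincreasing in j, so A always deletes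
-- the FIRST collected FR index: B just returns the collected list minus its head.

-- ===== PORT A =====
def calculate_FR (node : Int) (start : Int) (edges : List (List Int)) : Bool × Option (List Int) :=
  let n : Int := edges.length
  -- for i in range(start, len(edges)): if node == edges[i][1] and edges[i][2] == 6: count; append
  let st := (PySem.List.pyRange start n 1).foldl
    (fun (st : Int × List Int) i =>
      if node == (PySem.List.pyGetD edges i []).getD 1 0
          && (PySem.List.pyGetD edges i []).getD 2 0 == 6
      then (st.1 + 1, st.2 ++ [i]) else st)
    ((0 : Int), ([] : List Int))
  if st.1 > 0 then
    -- degree_list: for j in fr_list: count node == edges[x][0] for x in range(j, len(edges))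
    let degree_list := st.2.foldl
      (fun (acc : List Int) j =>
        acc ++ [(PySem.List.pyRange j n 1).foldl
          (fun (c : Int) x =>
            if node == (PySem.List.pyGetD edges x []).getD 0 0 then c + 1 else c) 0])
      []
    match PySem.List.max? degree_list (fun d => d) with
    | none => (true, some st.2)   -- unreachable: degree_list is nonempty when st.1 > 0
    | some m =>
      if m = 0 then (true, some (st.2.eraseIdx 0))
      else (true, some (st.2.eraseIdx ((PySem.List.index? degree_list m).getD 0)))
  else (false, none)

-- ===== PORT B =====
def calculate_FR_alt (node : Int) (start : Int) (edges : List (List Int)) : Bool × Option (List Int) :=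
  let fr_list := (PySem.List.pyRange start (edges.length : Int) 1).filter
    (fun i =>
      node == (PySem.List.pyGetD edges i []).getD 1 0
        && (PySem.List.pyGetD edges i []).getD 2 0 == 6)
  if fr_list.isEmpty then (false, none)
  else (true, some (PySem.List.slice fr_list (some 1) none))   -- fr_list[1:]

-- ===== PRECONDITION & SPEC =====
-- Pre_ excludes exactly the inputs where A raises IndexError: a start below
-- -len(edges), or a scanned row too short for the fields the scan reads
-- (length < 2, or length 2 whose second entry equals node so edges[i][2] is read).
def Pre_calculate_FR (node : Int) (start : Int) (edges : List (List Int)) : Prop :=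
  -(edges.length : Int) ≤ start ∧
  ∀ r ∈ edges.drop start.toNat, 2 ≤ r.length ∧ (node = r.getD 1 0 → 3 ≤ r.length)
instance (node : Int) (start : Int) (edges : List (List Int)) : Decidable (Pre_calculate_FR node start edges) := by unfold Pre_calculate_FR; infer_instance

def pvWitness_calculate_FR : Int × Int × List (List Int) := (1, 0, [[2, 1, 6], [1, 3, 0]])

def Spec_calculate_FR (node : Int) (start : Int) (edges : List (List Int)) (out : Bool × Option (List Int)) : Prop := out = calculate_FR_alt node start edges
instance (node : Int) (start : Int) (edges : List (List Int)) (out : Bool × Option (List Int)) : Decidable (Spec_calculate_FR node start edges out) := by unfold Spec_calculate_FR; infer_instance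

-- ===== CLAIM (what is proved, stated in full; the proofs are below) =====
def Claim_equal_calculate_FR : Prop := ∀ (node : Int) (start : Int) (edges : List (List Int)), Dom_calculate_FR node start edges → Pre_calculate_FR node start edges → Spec_calculate_FR node start edges (calculate_FR node start edges)

-- ===== LEMMAS AND PROOFS =====

-- A's collection fold returns (count, filtered list).
theorem fold_count_filter (p : Int → Bool) (l : List Int) (c : Int) (acc : List Int) :
    l.foldl (fun (st : Int × List Int) i => if p i then (st.1 + 1, st.2 ++ [i]) else st) (c, acc)
      = (c + (l.countP p : Int), acc ++ l.filter p) := by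
  induction l generalizing c acc with
  | nil => simp
  | cons x t ih =>
    by_cases h : p x = true
    · simp [List.foldl_cons, h, ih]; ring_nf
    · simp [List.foldl_cons, h, ih]

-- folding max over elements all ≤ x leaves x.
theorem foldl_max_eq_self (x : Int) (t : List Int) (h : ∀ y ∈ t, y ≤ x) :
    t.foldl max x = x := by
  induction t generalizing x with
  | nil => rfl
  | cons a t ih =>
    simp only [List.foldl_cons]
    rw [max_eq_left (h a (by simp))]
    exact ih x (fun y hy => h y (by simp [hy]))

-- the degree count A computes for start index j, as a countP.
theorem degree_eq_countP (node : Int) (edges : List (List Int)) (j n : Int) :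
    (PySem.List.pyRange j n 1).foldl
      (fun (c : Int) x =>
        if node == (PySem.List.pyGetD edges x []).getD 0 0 then c + 1 else c) 0
    = ((PySem.List.pyRange j n 1).countP
        (fun x => node == (PySem.List.pyGetD edges x []).getD 0 0) : Int) := by
  rw [PySem.List.foldl_if_add_one]; ring

-- degree is nonincreasing in the start index.
theorem degree_mono (node : Int) (edges : List (List Int)) (j1 j2 n : Int)
    (h1 : j1 ≤ j2) (h2 : j2 ≤ n) :
    ((PySem.List.pyRange j2 n 1).countP
        (fun x => node == (PySem.List.pyGetD edges x []).getD 0 0) : Int)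
    ≤ ((PySem.List.pyRange j1 n 1).countP
        (fun x => node == (PySem.List.pyGetD edges x []).getD 0 0) : Int) := by
  rw [PySem.List.pyRange_one_append j1 j2 n h1 h2, List.countP_append]
  push_cast; omega

-- A's selection step always deletes the first element when the degree of the
-- head dominates; B just drops the head.
theorem erase_first_core (FR : List Int) (deg : Int → Int)
    (hmono : ∀ a ∈ FR, ∀ b ∈ FR, a ≤ b → deg b ≤ deg a)
    (hsort : FR.Pairwise (· < ·)) :
    (if ((FR.length : Int) > 0) then
      match PySem.List.max? (FR.map deg) (fun d => d) with
      | none => (true, some FR)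
      | some m =>
        if m = 0 then (true, some (FR.eraseIdx 0))
        else (true, some (FR.eraseIdx ((PySem.List.index? (FR.map deg) m).getD 0)))
     else ((false, none) : Bool × Option (List Int)))
    = (if FR.isEmpty then (false, none)
       else (true, some (PySem.List.slice FR (some 1) none))) := by
  cases FR with
  | nil => simp
  | cons h t =>
    have hle : ∀ y ∈ t.map deg, y ≤ deg h := by
      intro y hy
      obtain ⟨j, hj, rfl⟩ := List.mem_map.mp hy
      have hhj : h < j := (List.pairwise_cons.mp hsort).1 j hj
      exact hmono h (by simp) j (by simp [hj]) (le_of_lt hhj)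
    have hpos : ((0:Int) < ((h :: t).length : Int)) := by
      exact_mod_cast Nat.succ_pos t.length
    rw [if_pos hpos, List.map_cons, PySem.List.max?_id_cons, foldl_max_eq_self _ _ hle]
    have hidx : PySem.List.index? (deg h :: t.map deg) (deg h) = some 0 :=
      PySem.List.index?_cons_self _ _
    simp only [PySem.List.index?_eq_idxOf?] at hidx
    simp [hidx, PySem.List.slice_from_one]

theorem calculate_FR_spec : Claim_equal_calculate_FR := by
  intro node start edges _ _
  simp only [Spec_calculate_FR, calculate_FR, calculate_FR_alt]
  rw [fold_count_filter]
  simp only [zero_add, List.nil_append]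
  rw [PySem.List.foldl_append_singleton_eq_map]
  simp only [List.nil_append, degree_eq_countP, List.countP_eq_length_filter]
  refine erase_first_core _
    (fun j => (((PySem.List.pyRange j (edges.length : Int) 1).filter
        (fun x => node == (PySem.List.pyGetD edges x []).getD 0 0)).length : Int)) ?_ ?_
  · intro a ha b hb hab
    have hbn : b < (edges.length : Int) :=
      (PySem.List.mem_pyRange_one.mp (List.mem_of_mem_filter hb)).2
    simpa [List.countP_eq_length_filter] using
      degree_mono node edges a b _ hab (le_of_lt hbn)
  · exact (PySem.List.pairwise_lt_pyRange_one start (edges.length : Int)).filter _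

-- ===== VERDICT =====
-- (the statement of calculate_FR_spec is Claim_equal_calculate_FR above; proved directly above)
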